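-- pv_equiv track=rewrite | github.com/progaleijados/Treinos-de-Python | exercisesonline.py | search
-- ===== SOURCE A (Python) =====
-- def search(list):
--     # creates an empty list that will serve as the output list
--     end = []
--     # starts the loop - one by one, it analyses the elements in the list
--     for elem_list in list:
--         # condition to stop the loop
--         if (elem_list > 500):
--             break
--             # conditions given by the exercise to choose which element goes to the new list
--         if (elem_list % 5 == 0 and elem_list <= 150):
--             end.append(elem_list)
--     return end
-- ===== SOURCE B (Python) =====
-- def search(list):
--     # Recursive decomposition: the result for a list is decided from its head,
--     # with the result built front-to-back on the way OUT of the recursion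
--     # (cons on return), instead of A's iterative loop appending to an accumulator.
--     if not list or list[0] > 500:
--         return []
--     head, rest = list[0], search(list[1:])
--     if head % 5 == 0 and head <= 150:
--         return [head] + rest
--     return rest
-- ===== Notes on version B (the rewrite author's own statement) =====
-- stated objective: alternative
-- what changed: Replaces A's iterative loop-with-break that appends matches to a mutable accumulator by a structural recursion with no accumulator: the >500 element becomes a base case and the output is built by consing on the way out of the recursion.
import Mathlib
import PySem

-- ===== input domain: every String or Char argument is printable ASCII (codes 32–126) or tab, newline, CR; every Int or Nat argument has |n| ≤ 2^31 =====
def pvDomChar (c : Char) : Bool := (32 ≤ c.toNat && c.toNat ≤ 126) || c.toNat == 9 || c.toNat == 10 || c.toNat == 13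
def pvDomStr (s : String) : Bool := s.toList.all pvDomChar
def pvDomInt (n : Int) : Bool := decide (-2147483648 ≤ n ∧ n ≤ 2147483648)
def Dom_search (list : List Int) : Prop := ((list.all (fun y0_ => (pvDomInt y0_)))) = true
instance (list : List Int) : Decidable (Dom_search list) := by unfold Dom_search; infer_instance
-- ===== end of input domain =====

-- B replaces A's iterative loop-with-break and accumulator by an accumulator-free
-- structural recursion that conses results on return (alternative decomposition).


-- ===== PORT A =====
-- literal port: loop with break, accumulating `end`; recursion carries the accumulator
def searchLoop (xs : List Int) (acc : List Int) : List Int :=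
  match xs with
  | [] => acc
  | x :: rest =>
    if x > 500 then acc
    else if PySem.Int.mod x 5 = 0 ∧ x ≤ 150 then searchLoop rest (acc ++ [x])
    else searchLoop rest acc

def search (list : List Int) : List Int := searchLoop list []

-- ===== PORT B =====
-- literal port of Source B: base case on empty or head > 500, cons on return
def search_alt (list : List Int) : List Int :=
  match list with
  | [] => []
  | head :: tail =>
    if head > 500 then []
    else
      let rest := search_alt tail
      if PySem.Int.mod head 5 = 0 ∧ head ≤ 150 then head :: rest
      else rest

-- ===== PRECONDITION & SPEC =====
def Spec_search (list : List Int) (out : List Int) : Prop := out = search_alt list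
instance (list : List Int) (out : List Int) : Decidable (Spec_search list out) := by unfold Spec_search; infer_instance

-- ===== CLAIM (what is proved, stated in full; the proofs are below) =====
def Claim_equal_search : Prop := ∀ (list : List Int), Dom_search list → Spec_search list (search list)

-- ===== LEMMAS AND PROOFS =====
theorem searchLoop_eq (xs : List Int) (acc : List Int) :
    searchLoop xs acc = acc ++ search_alt xs := by
  induction xs generalizing acc with
  | nil => simp [searchLoop, search_alt]
  | cons x rest ih =>
    by_cases h : x > 500
    · simp [searchLoop, search_alt, h]
    · simp only [searchLoop, search_alt, if_neg h, ih]
      split <;> simp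

-- ===== VERDICT (by name: the statement is the Claim_ definition above) =====
theorem search_spec : Claim_equal_search := by
  intro list _
  unfold Spec_search search
  simp [searchLoop_eq]
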